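-- pv_equiv track=rewrite | github.com/JosephPai/Art-Description | MaskedSentenceGeneration/utils.py | list2long
-- ===== SOURCE A (Python) =====
-- def list2long(tokens, max_len=10000):
--     tokens = sorted(tokens, key=lambda x: len(x), reverse=True)
--     ret = []
--     for t in tokens:
--         if len(ret) + len(t) > max_len:
--             break
--         ret.extend(t)
--         ret.extend(['<.>'])
--     return ret
-- ===== SOURCE B (Python) =====
-- def list2long(tokens, max_len=10000):
--     ts = sorted(tokens, key=lambda x: len(x), reverse=True)
--
--     # cost(i) = output length if the first i tokens are kept (each followed by '<.>');
--     # overflow(i) = "token i does not fit after the first i".  Since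
--     # cost(i+1) + len(ts[i+1]) = cost(i) + len(ts[i]) + 1 + len(ts[i+1]),
--     # the quantity cost(i) + len(ts[i]) is strictly increasing in i (for ANY list),
--     # so overflow is monotone and the first overflow index can be binary-searched.
--     def overflow(i):
--         return sum(len(t) + 1 for t in ts[:i]) + len(ts[i]) > max_len
--
--     lo, hi = 0, len(ts)
--     while lo < hi:
--         mid = (lo + hi) // 2
--         if overflow(mid):
--             hi = mid
--         else:
--             lo = mid + 1
--     return [w for t in ts[:lo] for w in t + ['<.>']]
-- ===== Notes on version B (the rewrite author's own statement) =====
-- stated objective: alternative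
-- what changed: B replaces A's greedy accumulate-and-break loop by a binary search: the fill quantity cost(i)+len(ts[i]) is strictly increasing along the length-sorted list, so the first overflow index is found by bisection and the kept prefix is then flattened with separators in one comprehension.
import Mathlib
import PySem

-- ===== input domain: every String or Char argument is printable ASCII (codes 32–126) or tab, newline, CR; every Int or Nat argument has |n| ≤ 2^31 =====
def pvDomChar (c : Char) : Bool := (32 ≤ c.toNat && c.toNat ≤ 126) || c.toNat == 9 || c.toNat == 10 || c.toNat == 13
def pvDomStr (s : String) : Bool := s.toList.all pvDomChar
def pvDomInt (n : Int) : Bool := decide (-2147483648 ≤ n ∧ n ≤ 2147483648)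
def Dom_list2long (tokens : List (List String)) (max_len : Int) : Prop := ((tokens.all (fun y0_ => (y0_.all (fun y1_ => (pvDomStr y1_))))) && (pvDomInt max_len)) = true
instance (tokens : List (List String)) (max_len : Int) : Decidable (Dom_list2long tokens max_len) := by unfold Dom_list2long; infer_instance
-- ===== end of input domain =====

-- B finds the cutoff by binary search (the fill quantity is strictly increasing) instead of
-- A's greedy accumulate-and-break loop; same values everywhere (objective: alternative).

-- ===== PORT A =====
-- A: fused loop — sort by length descending, then grow ret until a token would overflow max_len.
def list2longLoop (ml : Int) : List (List String) → List String → List String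
  | [], ret => ret
  | t :: rest, ret =>
      if (ret.length : Int) + (t.length : Int) > ml then ret
      else list2longLoop ml rest ((ret ++ t) ++ ["<.>"])

def list2long (tokens : List (List String)) (max_len : Int) : List String :=
  list2longLoop max_len (PySem.List.sorted tokens (fun x => (x.length : Int)) true) []

-- ===== PORT B =====
-- B: overflow(i) — "token i does not fit after the first i tokens (each + one separator)".
-- Python indexes ts[i] only with i < len ts, so getD is exact here.
def overflowAt (ts : List (List String)) (ml : Int) (i : Nat) : Bool :=
  ((ts.take i).map (fun t => (t.length : Int) + 1)).sum + ((ts.getD i []).length : Int) > ml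

-- the while-loop of B's bisection
def bsearch (ts : List (List String)) (ml : Int) (lo hi : Nat) : Nat :=
  if lo < hi then
    let mid := (lo + hi) / 2
    if overflowAt ts ml mid then bsearch ts ml lo mid else bsearch ts ml (mid + 1) hi
  else lo
termination_by hi - lo
decreasing_by all_goals omega

def list2long_alt (tokens : List (List String)) (max_len : Int) : List String :=
  let ts := PySem.List.sorted tokens (fun x => (x.length : Int)) true
  (ts.take (bsearch ts max_len 0 ts.length)).flatMap (fun t => t ++ ["<.>"])

-- ===== PRECONDITION & SPEC =====
def Spec_list2long (tokens : List (List String)) (max_len : Int) (out : List String) : Prop := out = list2long_alt tokens max_len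
instance (tokens : List (List String)) (max_len : Int) (out : List String) : Decidable (Spec_list2long tokens max_len out) := by unfold Spec_list2long; infer_instance

-- ===== CLAIM (what is proved, stated in full; the proofs are below) =====
def Claim_equal_list2long : Prop := ∀ (tokens : List (List String)) (max_len : Int), Dom_list2long tokens max_len → Spec_list2long tokens max_len (list2long tokens max_len)

-- ===== LEMMAS AND PROOFS =====

-- proof-only helper: the index at which A's greedy loop stops
def cutoffLoop (ml : Int) : List (List String) → Int → Nat
  | [], _ => 0
  | t :: rest, cur =>
      if cur + (t.length : Int) > ml then 0
      else cutoffLoop ml rest (cur + (t.length : Int) + 1) + 1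

lemma list2longLoop_eq (ml : Int) : ∀ (l : List (List String)) (ret : List String),
    list2longLoop ml l ret
      = ret ++ (l.take (cutoffLoop ml l (ret.length : Int))).flatMap (fun t => t ++ ["<.>"]) := by
  intro l
  induction l with
  | nil => intro ret; simp [list2longLoop, cutoffLoop]
  | cons t rest ih =>
      intro ret
      simp only [list2longLoop, cutoffLoop]
      split
      · simp
      · rw [ih ((ret ++ t) ++ ["<.>"])]
        have hlen : (((ret ++ t) ++ ["<.>"]).length : Int) = (ret.length : Int) + (t.length : Int) + 1 := by
          simp; omega
        rw [hlen]
        simp [List.take_succ_cons, List.flatMap_cons]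

def costPrefix (ts : List (List String)) (i : Nat) : Int :=
  ((ts.take i).map (fun t => (t.length : Int) + 1)).sum

lemma costPrefix_succ (t : List String) (rest : List (List String)) (j : Nat) :
    costPrefix (t :: rest) (j + 1) = (t.length : Int) + 1 + costPrefix rest j := by
  simp [costPrefix, List.take_succ_cons]

-- characterization of the greedy cutoff
lemma cutoffLoop_le (ml : Int) : ∀ (l : List (List String)) (cur : Int),
    cutoffLoop ml l cur ≤ l.length := by
  intro l
  induction l with
  | nil => intro cur; simp [cutoffLoop]
  | cons t rest ih =>
      intro cur
      simp only [cutoffLoop]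
      split
      · simp
      · simpa using Nat.succ_le_succ (ih _)

lemma cutoffLoop_fits (ml : Int) : ∀ (l : List (List String)) (cur : Int) (i : Nat),
    i < cutoffLoop ml l cur →
    cur + costPrefix l i + ((l.getD i []).length : Int) ≤ ml := by
  intro l
  induction l with
  | nil => intro cur i h; simp [cutoffLoop] at h
  | cons t rest ih =>
      intro cur i h
      by_cases hov : cur + (t.length : Int) > ml
      · simp [cutoffLoop, hov] at h
      · simp only [cutoffLoop, hov, if_false] at h
        cases i with
        | zero => simp [costPrefix]; omega
        | succ j =>
            have hstep := ih (cur + (t.length : Int) + 1) j (by omega)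
            rw [costPrefix_succ, List.getD_cons_succ]
            linarith

lemma cutoffLoop_over (ml : Int) : ∀ (l : List (List String)) (cur : Int),
    cutoffLoop ml l cur < l.length →
    cur + costPrefix l (cutoffLoop ml l cur)
      + ((l.getD (cutoffLoop ml l cur) []).length : Int) > ml := by
  intro l
  induction l with
  | nil => intro cur h; simp at h
  | cons t rest ih =>
      intro cur h
      by_cases hov : cur + (t.length : Int) > ml
      · rw [show cutoffLoop ml (t :: rest) cur = 0 from by simp [cutoffLoop, hov]]
        simp [costPrefix]; omega
      · have hcut : cutoffLoop ml (t :: rest) cur = cutoffLoop ml rest (cur + (t.length : Int) + 1) + 1 := by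
          simp [cutoffLoop, hov]
        rw [hcut] at h ⊢
        have h' : cutoffLoop ml rest (cur + (t.length : Int) + 1) < rest.length := by
          simp at h; omega
        have hstep := ih (cur + (t.length : Int) + 1) h'
        rw [costPrefix_succ, List.getD_cons_succ]
        linarith

-- the fill quantity is monotone (for any list, sorted or not)
lemma fill_mono (ts : List (List String)) (i j : Nat) (hij : i ≤ j) (hj : j < ts.length) :
    costPrefix ts i + ((ts.getD i []).length : Int)
      ≤ costPrefix ts j + ((ts.getD j []).length : Int) := by
  induction j with
  | zero => interval_cases i; exact le_refl _
  | succ k ihk =>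
      rcases Nat.lt_or_ge i (k + 1) with hlt | hge
      · have hk : k < ts.length := by omega
        have step : costPrefix ts k + ((ts.getD k []).length : Int)
            ≤ costPrefix ts (k + 1) + ((ts.getD (k + 1) []).length : Int) := by
          have htake : ts.take (k + 1) = ts.take k ++ [ts.getD k []] := by
            rw [List.take_add_one]
            simp [List.getElem?_eq_getElem hk, List.getD]
          have hcp : costPrefix ts (k + 1) = costPrefix ts k + (((ts.getD k []).length : Int) + 1) := by
            simp [costPrefix, htake]
          rw [hcp]
          have hpos : (0 : Int) ≤ ((ts.getD (k + 1) []).length : Int) := by positivity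
          linarith
        exact le_trans (ihk (by omega) (by omega)) step
      · have : i = k + 1 := by omega
        subst this; exact le_refl _

-- binary search returns any index c with "all below fit, all from c on overflow"
lemma bsearch_eq (ts : List (List String)) (ml : Int) (c : Nat) :
    ∀ (n lo hi : Nat), hi ≤ lo + n → lo ≤ c → c ≤ hi →
    (∀ i, i < c → overflowAt ts ml i = false) →
    (∀ i, c ≤ i → i < hi → overflowAt ts ml i = true) →
    bsearch ts ml lo hi = c := by
  intro n
  induction n with
  | zero =>
      intro lo hi hfuel hloc hchi _ _
      rw [bsearch]
      have h : ¬ lo < hi := by omega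
      simp only [h, if_false]
      omega
  | succ m IH =>
      intro lo hi hfuel hloc hchi hbelow habove
      rw [bsearch]
      by_cases hlt : lo < hi
      · simp only [hlt, if_true]
        by_cases hov : overflowAt ts ml ((lo + hi) / 2) = true
        · simp only [hov, if_true]
          have hcmid : c ≤ (lo + hi) / 2 := by
            by_contra hn
            have := hbelow ((lo + hi) / 2) (by omega)
            rw [this] at hov; exact Bool.noConfusion hov
          exact IH lo ((lo + hi) / 2) (by omega) hloc hcmid hbelow
            (fun i hci hih => habove i hci (by omega))
        · rw [if_neg hov]
          have hmidc : (lo + hi) / 2 < c := by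
            by_contra hn
            exact hov (habove ((lo + hi) / 2) (by omega) (by omega))
          exact IH ((lo + hi) / 2 + 1) hi (by omega) (by omega) hchi hbelow habove
      · simp only [hlt, if_false]; omega

-- the greedy cutoff satisfies bsearch's characterization
lemma bsearch_eq_cutoff (ts : List (List String)) (ml : Int) :
    bsearch ts ml 0 ts.length = cutoffLoop ml ts 0 := by
  have hc := cutoffLoop_le ml ts 0
  apply bsearch_eq ts ml (cutoffLoop ml ts 0) ts.length 0 ts.length (by omega) (by omega) hc
  · intro i hi
    have h := cutoffLoop_fits ml ts 0 i hi
    simp only [costPrefix] at h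
    simp only [overflowAt, decide_eq_false_iff_not, not_lt]
    linarith
  · intro i hci hil
    have hover := cutoffLoop_over ml ts 0 (by omega)
    have hmono := fill_mono ts (cutoffLoop ml ts 0) i hci hil
    simp only [costPrefix] at hover hmono
    simp only [overflowAt, decide_eq_true_eq]
    linarith

-- ===== VERDICT (by name: the statement is the Claim_ definition above) =====
theorem list2long_spec : Claim_equal_list2long := by
  intro tokens max_len _
  unfold Spec_list2long
  simp only [list2long, list2long_alt]
  rw [list2longLoop_eq, bsearch_eq_cutoff]
  simp
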